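-- pv_equiv track=rewrite | github.com/davidgamero/terminal-gatech-2019 | great-wall/buildingFunctions.py | getColumnsRight
-- ===== SOURCE A (Python) =====
-- def getColumnsRight(startx):
--     x = startx
--     y = 27-(x-14)
--     columnIndices = [[x,y]]
--     x-=1
--     columnIndices.append([x,y])
--     y-=1
--     while y>27-startx:
--         columnIndices.append([x,y])
--         x-=1
--         columnIndices.append([x,y])
--         y-=1
--
--     columnIndices.append([x,y])
--     return columnIndices
-- ===== SOURCE B (Python) =====
-- def getColumnsRight(startx):
--     # The loop in the original always runs exactly 13 times, so the result has
--     # exactly 29 entries; each entry is a closed-form function of its index.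
--     return [[startx - (i + 1) // 2, 41 - startx - i // 2] for i in range(29)]
-- ===== Notes on version B (the rewrite author's own statement) =====
-- stated objective: simpler
-- what changed: Replaces the stateful step-and-test while loop (whose exit condition is in fact independent of startx) by a single comprehension computing each of the twenty-nine coordinate pairs in closed form from its index.
import Mathlib
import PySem

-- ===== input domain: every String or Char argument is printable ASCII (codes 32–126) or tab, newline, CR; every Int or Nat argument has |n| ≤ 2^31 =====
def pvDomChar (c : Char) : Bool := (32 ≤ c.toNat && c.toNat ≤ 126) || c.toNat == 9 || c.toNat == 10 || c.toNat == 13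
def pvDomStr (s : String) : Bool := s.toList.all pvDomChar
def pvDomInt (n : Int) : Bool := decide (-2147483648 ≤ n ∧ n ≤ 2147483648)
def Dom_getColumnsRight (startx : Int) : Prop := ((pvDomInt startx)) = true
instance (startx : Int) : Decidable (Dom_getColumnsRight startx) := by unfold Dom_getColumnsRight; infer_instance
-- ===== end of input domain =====

-- B replaces A's stateful step-and-test while loop (whose exit test never depends on
-- startx) by one closed-form comprehension over the 29 indices; objective: simpler.

-- ===== PORT A =====
-- the while loop of A: state (x, y, acc); condition y > 27 - startx
def getColumnsRightLoop (startx x y : Int) (acc : List (List Int)) : List (List Int) :=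
  if y > 27 - startx then
    -- append [x,y]; x-=1; append [x,y]; y-=1
    getColumnsRightLoop startx (x - 1) (y - 1) (acc ++ [[x, y], [x - 1, y]])
  else
    acc ++ [[x, y]]   -- the final append after the loop
termination_by (y - (27 - startx)).toNat
decreasing_by omega

def getColumnsRight (startx : Int) : List (List Int) :=
  let x := startx
  let y := 27 - (x - 14)
  let columnIndices := [[x, y]]
  let x := x - 1
  let columnIndices := columnIndices ++ [[x, y]]
  let y := y - 1
  getColumnsRightLoop startx x y columnIndices

-- ===== PORT B =====
def getColumnsRight_alt (startx : Int) : List (List Int) :=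
  (PySem.List.pyRange 0 29 1).map
    (fun i => [startx - PySem.Int.floordiv (i + 1) 2, 41 - startx - PySem.Int.floordiv i 2])

-- ===== PRECONDITION & SPEC =====
def Spec_getColumnsRight (startx : Int) (out : List (List Int)) : Prop := out = getColumnsRight_alt startx
instance (startx : Int) (out : List (List Int)) : Decidable (Spec_getColumnsRight startx out) := by unfold Spec_getColumnsRight; infer_instance

-- ===== CLAIM (what is proved, stated in full; the proofs are below) =====
def Claim_equal_getColumnsRight : Prop := ∀ (startx : Int), Dom_getColumnsRight startx → Spec_getColumnsRight startx (getColumnsRight startx)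

-- ===== LEMMAS AND PROOFS =====

-- ===== VERDICT (by name: the statement is the Claim_ definition above) =====
theorem getColumnsRight_spec : Claim_equal_getColumnsRight := by
  intro startx _
  unfold Spec_getColumnsRight getColumnsRight getColumnsRight_alt
  simp only []
  rw [getColumnsRightLoop]; rw [if_pos (by omega)]
  rw [getColumnsRightLoop]; rw [if_pos (by omega)]
  rw [getColumnsRightLoop]; rw [if_pos (by omega)]
  rw [getColumnsRightLoop]; rw [if_pos (by omega)]
  rw [getColumnsRightLoop]; rw [if_pos (by omega)]
  rw [getColumnsRightLoop]; rw [if_pos (by omega)]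
  rw [getColumnsRightLoop]; rw [if_pos (by omega)]
  rw [getColumnsRightLoop]; rw [if_pos (by omega)]
  rw [getColumnsRightLoop]; rw [if_pos (by omega)]
  rw [getColumnsRightLoop]; rw [if_pos (by omega)]
  rw [getColumnsRightLoop]; rw [if_pos (by omega)]
  rw [getColumnsRightLoop]; rw [if_pos (by omega)]
  rw [getColumnsRightLoop]; rw [if_pos (by omega)]
  rw [getColumnsRightLoop]; rw [if_neg (by omega)]
  norm_num [PySem.List.pyRange, PySem.Int.floordiv, show Int.toNat 29 = 29 from rfl,
    List.range_succ, Function.comp, Int.fdiv, List.cons.injEq]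
  omega
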